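-- pv_equiv track=rewrite | github.com/W567871/LC | UCO/findReplace1.py | convert
-- ===== SOURCE A (Python) =====
-- def convert(str1:str, str2:str) -> int:
--     if str1 == str2:
--       return 0
--
--     mappings = {}
--
--     # No char in str1 can be mapped to > 1 char in str2
--     for a, b in zip(str1, str2):
--       if mappings.get(a, b) != b:
--         return -1
--       mappings[a] = b
--
--     # No char in str1 maps to > 1 char in str2 and
--     # There is at lest one temp char can break any loops
--     if (len(set(str2)) >= 52):
--         return -1;
--
--     count = 0
--     for key in list(mappings):
--       if (key in mappings):
--           val = mappings[key]
--           if (key==val):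
--               continue
--
--           if (val in mappings and mappings[val] == key):
--               count += 3;
--               del mappings[val]
--           else:
--               count += 1
--           del mappings[key]
--
--     return count
-- ===== SOURCE B (Python) =====
-- def convert(str1: str, str2: str) -> int:
--     if str1 == str2:
--         return 0
--
--     mappings = {}
--     for a, b in zip(str1, str2):
--         if mappings.setdefault(a, b) != b:
--             return -1
--
--     if len(set(str2)) >= 52:
--         return -1
--
--     # Non-mutating count: 1 per key that must change, plus 1 extra per mutual-swap pair.
--     changed = sum(1 for k, v in mappings.items() if v != k)
--     swaps = sum(1 for k, v in mappings.items() if v != k and mappings.get(v) == k)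
--     return changed + swaps // 2
-- ===== Notes on version B (the rewrite author's own statement) =====
-- stated objective: simpler
-- what changed: The destructive counting loop (snapshot iteration with del of keys and their swap partners) is replaced by a non-mutating closed-form count — changed keys plus half the number of mutual-swap endpoints — and the mapping is built with non-overwriting setdefault instead of overwrite-after-check.
import Mathlib
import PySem

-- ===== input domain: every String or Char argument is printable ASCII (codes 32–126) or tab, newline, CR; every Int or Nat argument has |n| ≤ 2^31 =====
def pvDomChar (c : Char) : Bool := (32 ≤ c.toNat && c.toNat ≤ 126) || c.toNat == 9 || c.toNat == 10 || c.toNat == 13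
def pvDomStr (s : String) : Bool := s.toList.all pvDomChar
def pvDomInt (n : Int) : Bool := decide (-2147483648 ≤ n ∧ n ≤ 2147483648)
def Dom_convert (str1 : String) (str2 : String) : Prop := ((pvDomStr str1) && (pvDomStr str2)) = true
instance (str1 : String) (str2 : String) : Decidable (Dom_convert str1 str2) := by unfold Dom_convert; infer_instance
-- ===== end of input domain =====

-- B replaces A's destructive counting loop (snapshot iteration + del) by a non-mutating
-- closed-form count (changed keys + swap-endpoints // 2); objective: simpler.

-- ===== PORT A =====
-- the consistency-checked mapping construction (for a, b in zip(...): ... return -1 ... mappings[a] = b)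
def pvBuildMap : List (Char × Char) → PySem.Dict Char Char → Option (PySem.Dict Char Char)
  | [], m => some m
  | (a, b) :: rest, m =>
    if m.getD a b ≠ b then none
    else pvBuildMap rest (m.insert a b)

-- the counting loop: for key in list(mappings): ... (with del mutating the dict)
def pvCountLoop : List Char → PySem.Dict Char Char → Int → Int
  | [], _, c => c
  | k :: ks, m, c =>
    match m.get? k with
    | none => pvCountLoop ks m c
    | some v =>
      if k = v then pvCountLoop ks m c
      else if m.get? v = some k then pvCountLoop ks ((m.erase v).erase k) (c + 3)
      else pvCountLoop ks (m.erase k) (c + 1)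

def convert (str1 : String) (str2 : String) : Int :=
  if str1 = str2 then 0
  else
    match pvBuildMap (str1.toList.zip str2.toList) PySem.Dict.empty with
    | none => -1
    | some m =>
      if 52 ≤ (PySem.Set.ofList str2.toList).length then -1
      else pvCountLoop m.keys m 0

-- ===== PORT B =====
-- B's mapping construction: non-overwriting setdefault instead of overwrite-after-check
def pvBuildMapAlt : List (Char × Char) → PySem.Dict Char Char → Option (PySem.Dict Char Char)
  | [], m => some m
  | (a, b) :: rest, m =>
    let m' := m.setdefault a b
    if m'.getD a b ≠ b then none
    else pvBuildMapAlt rest m'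

def convert_alt (str1 : String) (str2 : String) : Int :=
  if str1 = str2 then 0
  else
    match pvBuildMapAlt (str1.toList.zip str2.toList) PySem.Dict.empty with
    | none => -1
    | some m =>
      if 52 ≤ (PySem.Set.ofList str2.toList).length then -1
      else
        let changed : Int := (m.items.countP (fun kv => kv.2 != kv.1) : Nat)
        let swaps : Int := (m.items.countP (fun kv => kv.2 != kv.1 && (m.get? kv.2 == some kv.1)) : Nat)
        changed + PySem.Int.floordiv swaps 2

-- ===== PRECONDITION & SPEC =====
def Spec_convert (str1 : String) (str2 : String) (out : Int) : Prop := out = convert_alt str1 str2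
instance (str1 : String) (str2 : String) (out : Int) : Decidable (Spec_convert str1 str2 out) := by unfold Spec_convert; infer_instance

-- ===== CLAIM (what is proved, stated in full; the proofs are below) =====
def Claim_equal_convert : Prop := ∀ (str1 : String) (str2 : String), Dom_convert str1 str2 → Spec_convert str1 str2 (convert str1 str2)

-- ===== LEMMAS AND PROOFS =====

-- the two Bool predicates B counts with, abbreviated for the proofs
def pvPredC : Char × Char → Bool := fun kv => kv.2 != kv.1
def pvPredS (m : PySem.Dict Char Char) : Char × Char → Bool :=
  fun kv => kv.2 != kv.1 && (m.get? kv.2 == some kv.1)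

-- B's setdefault-based construction agrees with A's overwrite-based one (on nodup-key dicts)
lemma pvBuildMapAlt_eq : ∀ (l : List (Char × Char)) (m : PySem.Dict Char Char),
    m.keys.Nodup → pvBuildMapAlt l m = pvBuildMap l m := by
  intro l
  induction l with
  | nil => intro m _; rfl
  | cons p rest ih =>
    intro m hnd
    obtain ⟨a, b⟩ := p
    by_cases hc : m.contains a = true
    · have hsd : m.setdefault a b = m := PySem.Dict.setdefault_of_contains m b hc
      obtain ⟨w, hw⟩ : ∃ w, m.get? a = some w := by
        rw [PySem.Dict.contains_eq_isSome_get?] at hc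
        exact Option.isSome_iff_exists.mp hc
      have hgD : m.getD a b = w := PySem.Dict.getD_of_get?_eq_some m b hw
      simp only [pvBuildMapAlt, pvBuildMap, hsd, hgD]
      by_cases hwb : w = b
      · rw [if_neg (by simp [hwb]), if_neg (by simp [hwb])]
        have hins : m.insert a b = m := by
          apply PySem.Dict.ext
          rw [PySem.Dict.items_insert_of_contains m b hc]
          conv_rhs => rw [← List.map_id m.items]
          apply List.map_congr_left
          rintro ⟨q1, q2⟩ hq
          by_cases hqa : q1 = a
          · have hq2 : m.get? q1 = some q2 := PySem.Dict.get?_of_mem_items m hq hnd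
            rw [hqa, hw] at hq2
            have : w = q2 := Option.some.inj hq2
            simp [hqa, ← this, hwb]
          · simp [hqa]
        rw [hins]
        exact ih m hnd
      · rw [if_pos (by simp [hwb]), if_pos (by simp [hwb])]
    · have hb : Bool.not (m.contains a) = true := by simp [hc]
      have hc' : m.contains a = false := by simpa using hc
      have hsd : m.setdefault a b = m.insert a b := PySem.Dict.setdefault_of_not_contains m b hc'
      have h1 : (m.insert a b).getD a b = b := PySem.Dict.getD_insert_self m a b b
      have h2 : m.getD a b = b := PySem.Dict.getD_of_not_contains m b hc'
      simp only [pvBuildMapAlt, pvBuildMap, hsd, h1, h2]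
      rw [if_neg (by simp), if_neg (by simp)]
      exact ih (m.insert a b) (PySem.Dict.nodup_keys_insert m a b hnd)

lemma pvBuildMap_nodup : ∀ (l : List (Char × Char)) (m m' : PySem.Dict Char Char),
    m.keys.Nodup → pvBuildMap l m = some m' → m'.keys.Nodup := by
  intro l
  induction l with
  | nil => intro m m' h hb; simp only [pvBuildMap] at hb; cases hb; exact h
  | cons p rest ih =>
    intro m m' h hb
    obtain ⟨a, b⟩ := p
    simp only [pvBuildMap] at hb
    split at hb
    · cases hb
    · exact ih _ _ (PySem.Dict.nodup_keys_insert m a b h) hb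

-- find? over a key-filter: looking up x after erasing key k
lemma pvFind?_filter_ne (l : List (Char × Char)) (k x : Char) :
    (l.filter (fun p => !(p.1 == k))).find? (fun p => p.1 == x)
      = if x = k then none else l.find? (fun p => p.1 == x) := by
  induction l with
  | nil => simp
  | cons a t ih =>
    by_cases hak : a.1 = k
    · have hf : (a :: t).filter (fun p => !(p.1 == k)) = t.filter (fun p => !(p.1 == k)) := by
        simp [hak]
      by_cases hxk : x = k
      · rw [hf, ih, if_pos hxk, if_pos hxk]
      · have hb : (a.1 == x) = false := by
          simp only [beq_eq_false_iff_ne, ne_eq, hak]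
          exact fun h => hxk h.symm
        rw [hf, ih, if_neg hxk, if_neg hxk]
        simp [hb]
    · have hf : (a :: t).filter (fun p => !(p.1 == k)) = a :: t.filter (fun p => !(p.1 == k)) := by
        simp [hak]
      by_cases hax : a.1 = x
      · have hxk : ¬ x = k := fun h => hak (by rw [hax, h])
        have hb : (a.1 == x) = true := by simp [hax]
        rw [hf, if_neg hxk]
        simp [hb]
      · have hb : (a.1 == x) = false := by simp [hax]
        rw [hf]
        simp only [List.find?_cons, hb]
        exact ih

lemma pvGet?_erase (m : PySem.Dict Char Char) (k x : Char) :
    (m.erase k).get? x = if x = k then none else m.get? x := by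
  simp only [PySem.Dict.get?, PySem.Dict.erase, pvFind?_filter_ne]
  split <;> rfl

lemma pvNodup_keys_erase (m : PySem.Dict Char Char) (k : Char) (h : m.keys.Nodup) :
    (m.erase k).keys.Nodup := by
  simp only [PySem.Dict.keys, PySem.Dict.erase] at *
  exact (List.filter_sublist.map Prod.fst).nodup h

-- removing the (unique) entry with key k from an items list
lemma pvCountP_remove_key (p : Char × Char → Bool) :
    ∀ (l : List (Char × Char)), (l.map Prod.fst).Nodup → ∀ (k v : Char), (k, v) ∈ l →
    l.countP p = (l.filter (fun q => !(q.1 == k))).countP p + (if p (k, v) then 1 else 0) := by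
  intro l
  induction l with
  | nil => intro _ k v hm; cases hm
  | cons a t ih =>
    intro hnd k v hm
    have hnd' : (t.map Prod.fst).Nodup := (List.nodup_cons.mp hnd).2
    have hna : a.1 ∉ t.map Prod.fst := (List.nodup_cons.mp hnd).1
    by_cases hak : a.1 = k
    · have hav : a = (k, v) := by
        rcases List.mem_cons.mp hm with h | h
        · exact h.symm
        · exact absurd (List.mem_map.mpr ⟨(k, v), h, rfl⟩) (hak ▸ hna)
      have hkt : ∀ q ∈ t, (!(q.1 == k)) = true := by
        intro q hq
        simp only [Bool.not_eq_eq_eq_not, Bool.not_true, beq_eq_false_iff_ne]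
        intro hqk
        exact hna (List.mem_map.mpr ⟨q, hq, by rw [hqk, hak]⟩)
      rw [List.filter_cons, List.countP_cons, List.filter_eq_self.mpr hkt, hav]
      simp
    · have hmt : (k, v) ∈ t := by
        rcases List.mem_cons.mp hm with h | h
        · exact absurd (by rw [← h]) hak
        · exact h
      rw [List.countP_cons, List.filter_cons]
      have : (!(a.1 == k)) = true := by simp [hak]
      rw [if_pos this, List.countP_cons, ih hnd' k v hmt]
      omega

-- the invariant-carrying loop characterisation:
-- twice A's count = twice (changed keys) + (swap endpoints), over the current dict
lemma pvCountLoop_eq : ∀ (ks : List Char) (m : PySem.Dict Char Char) (c : Int),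
    m.keys.Nodup →
    (∀ p ∈ m.items, p.2 ≠ p.1 → p.1 ∈ ks) →
    pvCountLoop ks m c * 2
      = c * 2 + 2 * ((m.items.countP pvPredC : Nat) : Int) + ((m.items.countP (pvPredS m) : Nat) : Int) := by
  intro ks
  induction ks with
  | nil =>
    intro m c hnd hinv
    have hc : m.items.countP pvPredC = 0 := by
      rw [List.countP_eq_zero]
      intro q hq
      simp only [pvPredC, bne_iff_ne, ne_eq]
      intro hne
      exact absurd (hinv q hq hne) (List.not_mem_nil)
    have hs : m.items.countP (pvPredS m) = 0 := by
      rw [List.countP_eq_zero]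
      intro q hq
      simp only [pvPredS, Bool.and_eq_true, bne_iff_ne, ne_eq]
      rintro ⟨hne, -⟩
      exact absurd (hinv q hq hne) (List.not_mem_nil)
    simp [pvCountLoop, hc, hs]
  | cons k ks ih =>
    intro m c hnd hinv
    have hkeysnd : (m.items.map Prod.fst).Nodup := hnd
    match hget : m.get? k with
    | none =>
      have hinv' : ∀ p ∈ m.items, p.2 ≠ p.1 → p.1 ∈ ks := by
        rintro ⟨p1, p2⟩ hp hne
        rcases List.mem_cons.mp (hinv ⟨p1, p2⟩ hp hne) with h | h
        · have hq := PySem.Dict.get?_of_mem_items m hp hnd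
          have h' : p1 = k := h
          rw [h', hget] at hq
          exact absurd hq (by simp)
        · exact h
      simp only [pvCountLoop, hget]
      exact ih m c hnd hinv'
    | some v =>
      by_cases hkv : k = v
      · -- fixed key: skipped, dict unchanged
        have hinv' : ∀ p ∈ m.items, p.2 ≠ p.1 → p.1 ∈ ks := by
          rintro ⟨p1, p2⟩ hp hne
          rcases List.mem_cons.mp (hinv ⟨p1, p2⟩ hp hne) with h | h
          · have hq := PySem.Dict.get?_of_mem_items m hp hnd
            have h' : p1 = k := h
            rw [h', hget] at hq
            exact absurd ((Option.some.inj hq).symm.trans (hkv.symm.trans h'.symm)) hne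
          · exact h
        simp only [pvCountLoop, hget, if_pos hkv]
        exact ih m c hnd hinv'
      · have hmemkv : (k, v) ∈ m.items := PySem.Dict.mem_items_of_get?_eq_some m hget
        have hCk : pvPredC (k, v) = true := by
          simp only [pvPredC, bne_iff_ne, ne_eq]
          exact fun h => hkv h.symm
        by_cases hswap : m.get? v = some k
        · -- mutual swap pair: both entries leave, A charges 3
          have hmemvk : (v, k) ∈ m.items := PySem.Dict.mem_items_of_get?_eq_some m hswap
          set m' := (m.erase v).erase k with hm'
          have hitems2 : m'.items = ((m.items.filter (fun q => !(q.1 == v))).filter (fun q => !(q.1 == k))) := rfl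
          have hnd1 : ((m.items.filter (fun q => !(q.1 == v))).map Prod.fst).Nodup := pvNodup_keys_erase m v hnd
          have hnd2 : m'.keys.Nodup := pvNodup_keys_erase (m.erase v) k (pvNodup_keys_erase m v hnd)
          have hmemkv1 : (k, v) ∈ m.items.filter (fun q => !(q.1 == v)) :=
            List.mem_filter.mpr ⟨hmemkv, by simp [hkv]⟩
          -- changed-count drops by 2
          have hCv : pvPredC (v, k) = true := by
            simp only [pvPredC, bne_iff_ne, ne_eq]
            exact hkv
          have hC : m.items.countP pvPredC = m'.items.countP pvPredC + 2 := by
            rw [pvCountP_remove_key pvPredC m.items hkeysnd v k hmemvk,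
                pvCountP_remove_key pvPredC _ hnd1 k v hmemkv1, ← hitems2]
            rw [if_pos hCk, if_pos hCv]
          -- swap-endpoint count drops by 2 (both (k,v) and (v,k) satisfy it)
          have hSk : pvPredS m (k, v) = true := by
            have hb : (m.get? v == some k) = true := by simp [hswap]
            simp only [pvPredS, hb, Bool.and_true, bne_iff_ne, ne_eq]
            exact fun h => hkv h.symm
          have hSv : pvPredS m (v, k) = true := by
            have hb : (m.get? k == some v) = true := by simp [hget]
            simp only [pvPredS, hb, Bool.and_true, bne_iff_ne, ne_eq]
            exact hkv
          have hcong : ∀ q ∈ m'.items, pvPredS m q = true ↔ pvPredS m' q = true := by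
            rintro ⟨q1, q2⟩ hq
            rw [hitems2] at hq
            have hqk : q1 ≠ k := by
              have := (List.mem_filter.mp hq).2; simpa using this
            have hqv : q1 ≠ v := by
              have := (List.mem_filter.mp (List.mem_filter.mp hq).1).2; simpa using this
            have hget' : m'.get? q2 = if q2 = k then none else if q2 = v then none else m.get? q2 := by
              rw [hm', pvGet?_erase, pvGet?_erase]
            by_cases h2k : q2 = k
            · constructor
              · intro h
                simp only [pvPredS, Bool.and_eq_true, beq_iff_eq] at h
                rw [h2k, hget] at h
                exact absurd (Option.some.inj h.2).symm hqv
              · intro h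
                simp only [pvPredS, Bool.and_eq_true, beq_iff_eq] at h
                rw [hget', if_pos h2k] at h
                exact absurd h.2 (by simp)
            · by_cases h2v : q2 = v
              · constructor
                · intro h
                  simp only [pvPredS, Bool.and_eq_true, beq_iff_eq] at h
                  rw [h2v, hswap] at h
                  exact absurd (Option.some.inj h.2).symm hqk
                · intro h
                  simp only [pvPredS, Bool.and_eq_true, beq_iff_eq] at h
                  rw [hget', if_neg h2k, if_pos h2v] at h
                  exact absurd h.2 (by simp)
              · have heq : m'.get? q2 = m.get? q2 := by rw [hget', if_neg h2k, if_neg h2v]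
                simp only [pvPredS, heq]
          have hS : m.items.countP (pvPredS m) = m'.items.countP (pvPredS m') + 2 := by
            rw [pvCountP_remove_key (pvPredS m) m.items hkeysnd v k hmemvk,
                pvCountP_remove_key (pvPredS m) _ hnd1 k v hmemkv1,
                ← hitems2, List.countP_congr hcong]
            rw [if_pos hSk, if_pos hSv]
          have hinv' : ∀ p ∈ m'.items, p.2 ≠ p.1 → p.1 ∈ ks := by
            intro p hp hne
            have hpk : p.1 ≠ k := by
              rw [hitems2] at hp
              have := (List.mem_filter.mp hp).2; simpa using this
            have hpm : p ∈ m.items := by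
              rw [hitems2] at hp
              exact List.mem_of_mem_filter (List.mem_of_mem_filter hp)
            rcases List.mem_cons.mp (hinv p hpm hne) with h | h
            · exact absurd h hpk
            · exact h
          simp only [pvCountLoop, hget, if_neg hkv, if_pos hswap]
          rw [ih m' (c + 3) hnd2 hinv', hC, hS]
          push_cast
          ring
        · -- ordinary changed key: only this entry leaves, A charges 1
          set m' := m.erase k with hm'
          have hitems : m'.items = m.items.filter (fun q => !(q.1 == k)) := rfl
          have hnd' : m'.keys.Nodup := pvNodup_keys_erase m k hnd
          have hC : m.items.countP pvPredC = m'.items.countP pvPredC + 1 := by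
            rw [pvCountP_remove_key pvPredC m.items hkeysnd k v hmemkv, ← hitems, if_pos hCk]
          have hSk : pvPredS m (k, v) = false := by
            have hb : (m.get? v == some k) = false := by simpa using hswap
            simp [pvPredS, hb]
          have hcong : ∀ q ∈ m'.items, pvPredS m q = true ↔ pvPredS m' q = true := by
            rintro ⟨q1, q2⟩ hq
            rw [hitems] at hq
            have hqk : q1 ≠ k := by
              have := (List.mem_filter.mp hq).2; simpa using this
            have hqm : (q1, q2) ∈ m.items := List.mem_of_mem_filter hq
            by_cases h2k : q2 = k
            · constructor
              · intro h
                simp only [pvPredS, Bool.and_eq_true, beq_iff_eq] at h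
                rw [h2k, hget] at h
                have hq1v : q1 = v := (Option.some.inj h.2).symm
                have hvk : (v, k) ∈ m.items := by rw [← hq1v, ← h2k]; exact hqm
                exact absurd (PySem.Dict.get?_of_mem_items m hvk hnd) hswap
              · intro h
                simp only [pvPredS, Bool.and_eq_true, beq_iff_eq] at h
                rw [hm', pvGet?_erase, if_pos h2k] at h
                exact absurd h.2 (by simp)
            · have heq : m'.get? q2 = m.get? q2 := by rw [hm', pvGet?_erase, if_neg h2k]
              simp only [pvPredS, heq]
          have hS : m.items.countP (pvPredS m) = m'.items.countP (pvPredS m') := by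
            rw [pvCountP_remove_key (pvPredS m) m.items hkeysnd k v hmemkv,
                ← hitems, List.countP_congr hcong, if_neg (by simp [hSk]), Nat.add_zero]
          have hinv' : ∀ p ∈ m'.items, p.2 ≠ p.1 → p.1 ∈ ks := by
            intro p hp hne
            have hpk : p.1 ≠ k := by
              rw [hitems] at hp
              have := (List.mem_filter.mp hp).2; simpa using this
            have hpm : p ∈ m.items := by rw [hitems] at hp; exact List.mem_of_mem_filter hp
            rcases List.mem_cons.mp (hinv p hpm hne) with h | h
            · exact absurd h hpk
            · exact h
          simp only [pvCountLoop, hget, if_neg hkv, if_neg hswap]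
          rw [ih m' (c + 1) hnd' hinv', hC, hS]
          push_cast
          ring

-- ===== VERDICT (by name: the statement is the Claim_ definition above) =====
theorem convert_spec : Claim_equal_convert := by
  intro str1 str2 _
  unfold Spec_convert convert convert_alt
  rw [pvBuildMapAlt_eq _ PySem.Dict.empty PySem.Dict.nodup_keys_empty]
  by_cases heq : str1 = str2
  · simp [heq]
  · simp only [if_neg heq]
    match hb : pvBuildMap (str1.toList.zip str2.toList) PySem.Dict.empty with
    | none => rfl
    | some m =>
      by_cases h52 : 52 ≤ (PySem.Set.ofList str2.toList).length
      · simp [h52]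
      · simp only [if_neg h52]
        have hnd : m.keys.Nodup :=
          pvBuildMap_nodup _ PySem.Dict.empty m PySem.Dict.nodup_keys_empty hb
        have hinv : ∀ p ∈ m.items, p.2 ≠ p.1 → p.1 ∈ m.keys := by
          intro p hp _
          exact PySem.Dict.mem_keys_of_mem_items m hp
        have hmain : pvCountLoop m.keys m 0 * 2
            = 0 * 2 + 2 * ((m.items.countP (fun kv => kv.2 != kv.1) : Nat) : Int)
              + ((m.items.countP (fun kv => kv.2 != kv.1 && (m.get? kv.2 == some kv.1)) : Nat) : Int) :=
          pvCountLoop_eq m.keys m 0 hnd hinv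
        rw [PySem.Int.floordiv_eq_ediv_of_pos (by norm_num)]
        omega
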